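-- pv_equiv track=rewrite | github.com/pizzama/framework | mod_team/battle/missionbattle.py | get_defen_buff
-- ===== SOURCE A (Python) =====
-- def get_defen_buff(battle_effect_list, country):
--     defen_buff = [0, 0, 0]
--     for buff in battle_effect_list:
--         if buff[2] == 49 and buff[3] in (0, country):
--             defen_buff[2] += buff[4]
--         elif buff[2] == 52 and buff[3] in (0, country):
--             defen_buff[1] += buff[4]
--     return defen_buff
-- ===== SOURCE B (Python) =====
-- def get_defen_buff(battle_effect_list, country):
--     return [0,
--             sum(b[4] for b in battle_effect_list if b[2] == 52 and b[3] in (0, country)),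
--             sum(b[4] for b in battle_effect_list if b[2] == 49 and b[3] in (0, country))]
-- ===== Notes on version B (the rewrite author's own statement) =====
-- stated objective: alternative
-- what changed: Replaced the single interleaved loop with if/elif accumulator updates by two independent filtered-sum passes (one per buff type) assembled directly into the result list literal.
import Mathlib
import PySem

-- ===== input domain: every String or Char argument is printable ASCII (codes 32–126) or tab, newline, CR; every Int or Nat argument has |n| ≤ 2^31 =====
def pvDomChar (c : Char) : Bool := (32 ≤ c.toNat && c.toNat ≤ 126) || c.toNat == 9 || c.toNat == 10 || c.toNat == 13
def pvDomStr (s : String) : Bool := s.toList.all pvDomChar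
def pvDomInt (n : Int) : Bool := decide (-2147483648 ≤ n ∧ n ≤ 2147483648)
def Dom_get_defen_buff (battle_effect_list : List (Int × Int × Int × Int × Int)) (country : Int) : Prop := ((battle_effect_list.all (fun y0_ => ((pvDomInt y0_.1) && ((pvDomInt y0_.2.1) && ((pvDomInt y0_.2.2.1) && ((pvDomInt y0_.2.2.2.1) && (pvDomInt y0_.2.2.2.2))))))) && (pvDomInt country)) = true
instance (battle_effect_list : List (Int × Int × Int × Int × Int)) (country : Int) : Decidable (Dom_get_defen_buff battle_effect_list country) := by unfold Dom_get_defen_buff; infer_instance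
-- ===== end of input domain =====

-- B replaces A's single loop with if/elif accumulator updates by two independent filtered-sum passes (alternative decomposition, same cost).

-- ===== PORT A =====
-- A's single pass: fold over the list carrying the mutable [d0, d1, d2] as a triple,
-- updating slot 2 on type 49 and slot 1 on type 52 (same branch order as the Python).
def get_defen_buff (battle_effect_list : List (Int × Int × Int × Int × Int)) (country : Int) : List Int :=
  let d := battle_effect_list.foldl
    (fun (d : Int × Int × Int) buff =>
      if buff.2.2.1 == 49 && (buff.2.2.2.1 == 0 || buff.2.2.2.1 == country) then
        (d.1, d.2.1, d.2.2 + buff.2.2.2.2)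
      else if buff.2.2.1 == 52 && (buff.2.2.2.1 == 0 || buff.2.2.2.1 == country) then
        (d.1, d.2.1 + buff.2.2.2.2, d.2.2)
      else d)
    (0, 0, 0)
  [d.1, d.2.1, d.2.2]

-- ===== PORT B =====
-- B: one filtered sum per slot, assembled directly.
def get_defen_buff_alt (battle_effect_list : List (Int × Int × Int × Int × Int)) (country : Int) : List Int :=
  [0,
   ((battle_effect_list.filter (fun b => b.2.2.1 == 52 && (b.2.2.2.1 == 0 || b.2.2.2.1 == country))).map (fun b => b.2.2.2.2)).sum,
   ((battle_effect_list.filter (fun b => b.2.2.1 == 49 && (b.2.2.2.1 == 0 || b.2.2.2.1 == country))).map (fun b => b.2.2.2.2)).sum]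

-- ===== PRECONDITION & SPEC =====
def Spec_get_defen_buff (battle_effect_list : List (Int × Int × Int × Int × Int)) (country : Int) (out : List Int) : Prop := out = get_defen_buff_alt battle_effect_list country
instance (battle_effect_list : List (Int × Int × Int × Int × Int)) (country : Int) (out : List Int) : Decidable (Spec_get_defen_buff battle_effect_list country out) := by unfold Spec_get_defen_buff; infer_instance

-- ===== CLAIM (what is proved, stated in full; the proofs are below) =====
def Claim_equal_get_defen_buff : Prop := ∀ (battle_effect_list : List (Int × Int × Int × Int × Int)) (country : Int), Dom_get_defen_buff battle_effect_list country → Spec_get_defen_buff battle_effect_list country (get_defen_buff battle_effect_list country)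

-- ===== LEMMAS AND PROOFS =====
-- Loop invariant: the fold starting from (a,b,c) adds the two filtered sums to b and c.
theorem get_defen_buff_fold (battle_effect_list : List (Int × Int × Int × Int × Int)) (country : Int) (a b c : Int) :
    battle_effect_list.foldl
      (fun (d : Int × Int × Int) buff =>
        if buff.2.2.1 == 49 && (buff.2.2.2.1 == 0 || buff.2.2.2.1 == country) then
          (d.1, d.2.1, d.2.2 + buff.2.2.2.2)
        else if buff.2.2.1 == 52 && (buff.2.2.2.1 == 0 || buff.2.2.2.1 == country) then
          (d.1, d.2.1 + buff.2.2.2.2, d.2.2)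
        else d)
      (a, b, c)
    = (a,
       b + ((battle_effect_list.filter (fun x => x.2.2.1 == 52 && (x.2.2.2.1 == 0 || x.2.2.2.1 == country))).map (fun x => x.2.2.2.2)).sum,
       c + ((battle_effect_list.filter (fun x => x.2.2.1 == 49 && (x.2.2.2.1 == 0 || x.2.2.2.1 == country))).map (fun x => x.2.2.2.2)).sum) := by
  induction battle_effect_list generalizing a b c with
  | nil => simp
  | cons hd tl ih =>
    by_cases h49 : (hd.2.2.1 == 49 && (hd.2.2.2.1 == 0 || hd.2.2.2.1 == country)) = true
    · have h52 : (hd.2.2.1 == 52 && (hd.2.2.2.1 == 0 || hd.2.2.2.1 == country)) = false := by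
        rcases Bool.and_eq_true .. |>.mp h49 with ⟨h1, _⟩
        simp_all
      simp only [List.foldl_cons, List.filter_cons, h49, h52, if_true, Bool.false_eq_true,
        if_false, ih, List.map_cons, List.sum_cons, Prod.mk.injEq]
      exact ⟨trivial, trivial, by ring⟩
    · by_cases h52 : (hd.2.2.1 == 52 && (hd.2.2.2.1 == 0 || hd.2.2.2.1 == country)) = true
      · rw [Bool.not_eq_true] at h49
        simp only [List.foldl_cons, List.filter_cons, h49, h52, if_true, Bool.false_eq_true,
          if_false, ih, List.map_cons, List.sum_cons, Prod.mk.injEq]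
        exact ⟨trivial, by ring, trivial⟩
      · rw [Bool.not_eq_true] at h49 h52
        simp only [List.foldl_cons, List.filter_cons, h49, h52, Bool.false_eq_true,
          if_false, ih]

-- ===== VERDICT (by name: the statement is the Claim_ definition above) =====
theorem get_defen_buff_spec : Claim_equal_get_defen_buff := by
  intro l country _
  unfold Spec_get_defen_buff get_defen_buff get_defen_buff_alt
  rw [get_defen_buff_fold]
  simp
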